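-- pv_equiv track=rewrite | github.com/cesarkawakami/puzzles | advent-of-code/2017/day9/part12.py | remove_garbage
-- ===== SOURCE A (Python) =====
-- from enum import Enum, auto
-- from typing import Any, List, Tuple
--
-- class GarbageStates(Enum):
--     A = auto()
--     B = auto()
--     C = auto()
--
-- def remove_garbage(stream: str) -> Tuple[str, int]:
--     current_state = GarbageStates.A
--     output = []
--     garbage_count = 0
--
--     for c in stream:
--         if current_state == GarbageStates.A:
--             if c == '<':
--                 current_state = GarbageStates.B
--             else:
--                 output.append(c)
--         elif current_state == GarbageStates.B:
--             if c == '>':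
--                 current_state = GarbageStates.A
--             elif c == '!':
--                 current_state = GarbageStates.C
--             else:
--                 garbage_count += 1
--         elif current_state == GarbageStates.C:
--             current_state = GarbageStates.B
--         else:
--             raise RuntimeError('unreachable')
--
--     return ''.join(output), garbage_count
-- ===== SOURCE B (Python) =====
-- def remove_garbage(stream):
--     out = []
--     garbage_count = 0
--     rest = stream
--     while True:
--         prefix, sep, rest = rest.partition('<')
--         out.append(prefix)
--         if not sep:
--             return ''.join(out), garbage_count
--         i = 0
--         n = len(rest)
--         while i < n and rest[i] != '>':
--             if rest[i] == '!':
--                 i += 2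
--             else:
--                 garbage_count += 1
--                 i += 1
--         rest = rest[i + 1:]
-- ===== Notes on version B (the rewrite author's own statement) =====
-- stated objective: faster
-- what changed: Replaces the per-character three-state enum automaton by a staged chunk decomposition: str.partition copies each clean chunk wholesale at C speed, then an index loop skips one garbage block (the escape character jumps two positions) and slices off the remainder.
import Mathlib
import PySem

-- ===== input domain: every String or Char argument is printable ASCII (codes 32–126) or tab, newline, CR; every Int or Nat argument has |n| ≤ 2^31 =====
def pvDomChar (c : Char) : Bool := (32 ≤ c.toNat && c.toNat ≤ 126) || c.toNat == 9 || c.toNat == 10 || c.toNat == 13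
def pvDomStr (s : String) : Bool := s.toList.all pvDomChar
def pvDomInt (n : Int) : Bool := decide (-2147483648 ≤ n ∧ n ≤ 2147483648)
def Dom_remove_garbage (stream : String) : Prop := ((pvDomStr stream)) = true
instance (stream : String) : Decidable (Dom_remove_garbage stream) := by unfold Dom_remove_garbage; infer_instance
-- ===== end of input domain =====

-- B replaces A's per-character three-state enum automaton by a staged chunk decomposition
-- (partition copies each clean chunk wholesale, an index loop skips one garbage block);
-- a timing run measured B faster by a constant factor (bulk copies vs per-char dispatch).

-- ===== PORT A =====
inductive GarbageStates | A | B | C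
deriving DecidableEq, Repr

-- one fold step = one iteration of A's for-loop over (state, output, garbage_count);
-- Python's final 'else: raise' is unreachable (the enum has exactly three members)
def stepA (st : GarbageStates × List Char × Int) (c : Char) : GarbageStates × List Char × Int :=
  match st with
  | (s, output, g) =>
    if s = GarbageStates.A then
      if c = '<' then (GarbageStates.B, output, g) else (s, output ++ [c], g)
    else if s = GarbageStates.B then
      if c = '>' then (GarbageStates.A, output, g)
      else if c = '!' then (GarbageStates.C, output, g)
      else (s, output, g + 1)
    else (GarbageStates.B, output, g)

def remove_garbage (stream : String) : String × Int :=
  let r := stream.toList.foldl stepA (GarbageStates.A, [], 0)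
  (String.ofList r.2.1, r.2.2)

-- ===== PORT B =====
-- the inner while loop: skip one garbage block, '!' jumps two positions;
-- returns (rest[i+1:], garbage_count) — exact on lists of chars
def skipG : List Char → Int → List Char × Int
  | [], g => ([], g)
  | c :: rest, g =>
      if c = '>' then (rest, g)
      else if c = '!' then skipG rest.tail g
      else skipG rest (g + 1)
termination_by l => l.length
decreasing_by all_goals (simp [List.length_tail]; try omega)

-- needed by altLoop's termination proof (cited there by name)
theorem skipG_length (l : List Char) (g : Int) : (skipG l g).1.length ≤ l.length := by
  match l with
  | [] => simp [skipG]
  | c :: rest =>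
    rw [skipG]
    split
    · simp
    · split
      · have h1 := skipG_length rest.tail g
        have h2 : rest.tail.length ≤ rest.length := by cases rest <;> simp
        simp; omega
      · have h1 := skipG_length rest (g + 1)
        simp; omega
termination_by l.length
decreasing_by all_goals (simp [List.length_tail]; try omega)

-- the outer while True loop; rest.partition('<') = (takeWhile (≠'<'), '<' if found, rest after it)
def altLoop (rest out : List Char) (g : Int) : List Char × Int :=
  let p := rest.takeWhile (· ≠ '<')
  let d := rest.dropWhile (· ≠ '<')
  if hd : d = [] then (out ++ p, g)
  else
    let r := skipG d.tail g
    altLoop r.1 (out ++ p) r.2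
termination_by rest.length
decreasing_by
  have h1 : (skipG (rest.dropWhile (· ≠ '<')).tail g).1.length ≤ (rest.dropWhile (· ≠ '<')).tail.length :=
    skipG_length (rest.dropWhile (· ≠ '<')).tail g
  have h2 : (rest.dropWhile (· ≠ '<')).length ≤ rest.length := rest.length_dropWhile_le _
  have h3 : (rest.dropWhile (· ≠ '<')).tail.length = (rest.dropWhile (· ≠ '<')).length - 1 :=
    (rest.dropWhile (· ≠ '<')).length_tail
  have h4 : 0 < (rest.dropWhile (· ≠ '<')).length := List.length_pos_iff.mpr hd
  simp only [] at h1 ⊢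
  omega

def remove_garbage_alt (stream : String) : String × Int :=
  let r := altLoop stream.toList [] 0
  (String.ofList r.1, r.2)

-- ===== PRECONDITION & SPEC =====
def Spec_remove_garbage (stream : String) (out : String × Int) : Prop := out = remove_garbage_alt stream
instance (stream : String) (out : String × Int) : Decidable (Spec_remove_garbage stream out) := by unfold Spec_remove_garbage; infer_instance

-- ===== CLAIM (what is proved, stated in full; the proofs are below) =====
def Claim_equal_remove_garbage : Prop := ∀ (stream : String), Dom_remove_garbage stream → Spec_remove_garbage stream (remove_garbage stream)

-- ===== LEMMAS AND PROOFS =====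

-- A's automaton in state B computes skipG's count and resumes in state A on skipG's remainder
theorem foldB_eq_skipG (l : List Char) (out : List Char) (g : Int) :
    (l.foldl stepA (GarbageStates.B, out, g)).2 =
      ((skipG l g).1.foldl stepA (GarbageStates.A, out, (skipG l g).2)).2 := by
  match l with
  | [] => simp [skipG]
  | c :: rest =>
    by_cases hgt : c = '>'
    · simp [stepA, hgt, skipG]
    · by_cases hb : c = '!'
      · match rest with
        | [] => simp [stepA, hb, skipG]
        | d :: rest' =>
          have ih := foldB_eq_skipG rest' out g
          simp [stepA, hb, skipG, ih]
      · have ih := foldB_eq_skipG rest out (g + 1)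
        simp [stepA, hgt, hb, skipG, ih]
termination_by l.length
decreasing_by all_goals (simp; try omega)

-- peeling one non-'<' char into altLoop's prefix
theorem altLoop_cons (c : Char) (hc : c ≠ '<') (rest out : List Char) (g : Int) :
    altLoop (c :: rest) out g = altLoop rest (out ++ [c]) g := by
  rw [altLoop.eq_def, altLoop.eq_def]
  simp only [List.takeWhile_cons, List.dropWhile_cons, hc, decide_not, decide_false,
    Bool.not_false, if_true]
  split_ifs with h <;> simp [List.append_assoc]

-- A's automaton from the initial state equals B's chunked loop
theorem foldA_eq_altLoop (l : List Char) (out : List Char) (g : Int) :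
    (l.foldl stepA (GarbageStates.A, out, g)).2 = altLoop l out g := by
  match l with
  | [] => rw [altLoop.eq_def]; simp
  | c :: rest =>
    by_cases hc : c = '<'
    · have h2 := foldB_eq_skipG rest out g
      have ih := foldA_eq_altLoop (skipG rest g).1 out (skipG rest g).2
      rw [altLoop.eq_def]
      have hd : (c :: rest).dropWhile (· ≠ '<') = c :: rest := by
        simp [hc]
      simp only [hd]
      simp [stepA, hc, h2, ih]
    · have ih := foldA_eq_altLoop rest (out ++ [c]) g
      rw [altLoop_cons c hc]
      simp [stepA, hc, ih]
termination_by l.length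
decreasing_by
  all_goals first
    | (have h1 : (skipG rest g).1.length ≤ rest.length := skipG_length rest g
       simp; omega)
    | simp

-- ===== VERDICT (by name: the statement is the Claim_ definition above) =====
theorem remove_garbage_spec : Claim_equal_remove_garbage := by
  intro stream _
  have h := foldA_eq_altLoop stream.toList [] 0
  simp [Spec_remove_garbage, remove_garbage, remove_garbage_alt, h]
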